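-- pv_equiv track=rewrite | github.com/AesthetiCite/AesthetiCite | app/api/protocol_bridge.py | confidence_from_rows
-- ===== SOURCE A (Python) =====
-- from typing import Any, Dict, List, Literal, Optional
--
-- ConfidenceLevel = Literal["High", "Moderate", "Low"]
--
-- def confidence_from_rows(rows: List[Dict[str, Any]]) -> ConfidenceLevel:
--     """
--     Derives a confidence level from the top-3 retrieved evidence rows.
--     'High' if a guideline or Level-I source is present; 'Moderate' for reviews
--     or Level II; 'Low' otherwise.
--     """
--     if not rows:
--         return "Low"
--     top_types = [str(r.get("document_type", "")).lower() for r in rows[:3]]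
--     top_levels = [str(r.get("evidence_level", "")).upper() for r in rows[:3]]
--     if any(t == "guideline" for t in top_types) or any(lv == "I" for lv in top_levels):
--         return "High"
--     if any(t == "review" for t in top_types) or any(lv == "II" for lv in top_levels):
--         return "Moderate"
--     return "Low"
-- ===== SOURCE B (Python) =====
-- def confidence_from_rows(rows):
--     """Single scoring pass over the top-3 rows: each row gets priority 3/2/1,
--     the running maximum is mapped back to a confidence label."""
--     if not rows:
--         return "Low"
--     best = 1
--     for r in rows[:3]:
--         t = str(r.get("document_type", "")).lower()
--         lv = str(r.get("evidence_level", "")).upper()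
--         if t == "guideline" or lv == "I":
--             s = 3
--         elif t == "review" or lv == "II":
--             s = 2
--         else:
--             s = 1
--         best = max(best, s)
--     if best == 3:
--         return "High"
--     if best == 2:
--         return "Moderate"
--     return "Low"
-- ===== Notes on version B (the rewrite author's own statement) =====
-- stated objective: alternative
-- what changed: Replaces A's two comprehension-built lists plus four any() scans with a single pass that scores each of the top-3 rows 3/2/1 and max-reduces, mapping the maximum back to a label.
import Mathlib
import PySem

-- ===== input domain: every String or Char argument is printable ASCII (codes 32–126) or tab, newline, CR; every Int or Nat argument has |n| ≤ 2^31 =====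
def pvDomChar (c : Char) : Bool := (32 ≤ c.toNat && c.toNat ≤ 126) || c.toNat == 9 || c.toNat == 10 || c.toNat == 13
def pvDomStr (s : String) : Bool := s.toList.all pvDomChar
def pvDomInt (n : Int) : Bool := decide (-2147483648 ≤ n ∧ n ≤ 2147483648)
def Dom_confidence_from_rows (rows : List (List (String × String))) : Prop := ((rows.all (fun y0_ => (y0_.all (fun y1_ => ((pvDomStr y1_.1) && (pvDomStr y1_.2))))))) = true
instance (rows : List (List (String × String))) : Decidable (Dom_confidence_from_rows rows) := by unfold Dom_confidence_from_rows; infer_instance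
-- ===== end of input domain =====

-- B re-implements A as one scoring pass (score each top-3 row 3/2/1, max-reduce, map back);
-- A builds two lowered/uppered lists and runs four any() scans. Same values everywhere.

-- ===== PORT A =====
def confidence_from_rows (rows : List (List (String × String))) : String :=
  if rows = [] then "Low"
  else
    let top_types := (PySem.List.slice rows none (some 3)).map
      (fun r => PySem.Str.lower (PySem.Dict.getD (PySem.Dict.mk r) "document_type" ""))
    let top_levels := (PySem.List.slice rows none (some 3)).map
      (fun r => PySem.Str.upper (PySem.Dict.getD (PySem.Dict.mk r) "evidence_level" ""))
    if top_types.any (fun t => t == "guideline") || top_levels.any (fun lv => lv == "I") then "High"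
    else if top_types.any (fun t => t == "review") || top_levels.any (fun lv => lv == "II") then "Moderate"
    else "Low"

-- ===== PORT B =====
-- the loop body of Source B: score one row
def rowScoreB (r : List (String × String)) : Nat :=
  let t := PySem.Str.lower (PySem.Dict.getD (PySem.Dict.mk r) "document_type" "")
  let lv := PySem.Str.upper (PySem.Dict.getD (PySem.Dict.mk r) "evidence_level" "")
  if t = "guideline" ∨ lv = "I" then 3
  else if t = "review" ∨ lv = "II" then 2
  else 1

def confidence_from_rows_alt (rows : List (List (String × String))) : String :=
  if rows = [] then "Low"
  else
    let best := (PySem.List.slice rows none (some 3)).foldl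
      (fun best r => max best (rowScoreB r)) 1
    if best = 3 then "High" else if best = 2 then "Moderate" else "Low"

-- ===== PRECONDITION & SPEC =====
def Spec_confidence_from_rows (rows : List (List (String × String))) (out : String) : Prop := out = confidence_from_rows_alt rows
instance (rows : List (List (String × String))) (out : String) : Decidable (Spec_confidence_from_rows rows out) := by unfold Spec_confidence_from_rows; infer_instance

-- ===== CLAIM (what is proved, stated in full; the proofs are below) =====
def Claim_equal_confidence_from_rows : Prop := ∀ (rows : List (List (String × String))), Dom_confidence_from_rows rows → Spec_confidence_from_rows rows (confidence_from_rows rows)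

-- ===== LEMMAS AND PROOFS =====

lemma rowScoreB_cases (r : List (String × String)) :
    rowScoreB r = 3 ∨ rowScoreB r = 2 ∨ rowScoreB r = 1 := by
  simp only [rowScoreB]; split_ifs <;> simp

lemma rowScoreB_eq_three_iff (r : List (String × String)) :
    rowScoreB r = 3 ↔ (PySem.Str.lower (PySem.Dict.getD (PySem.Dict.mk r) "document_type" "") = "guideline" ∨ PySem.Str.upper (PySem.Dict.getD (PySem.Dict.mk r) "evidence_level" "") = "I") := by
  simp only [rowScoreB]; split_ifs <;> simp_all

lemma rowScoreB_eq_two_iff (r : List (String × String)) :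
    rowScoreB r = 2 ↔ (¬(PySem.Str.lower (PySem.Dict.getD (PySem.Dict.mk r) "document_type" "") = "guideline" ∨ PySem.Str.upper (PySem.Dict.getD (PySem.Dict.mk r) "evidence_level" "") = "I") ∧ (PySem.Str.lower (PySem.Dict.getD (PySem.Dict.mk r) "document_type" "") = "review" ∨ PySem.Str.upper (PySem.Dict.getD (PySem.Dict.mk r) "evidence_level" "") = "II")) := by
  simp only [rowScoreB]; split_ifs <;> simp_all

lemma foldl_max_shift (l : List (List (String × String))) :
    ∀ b c : Nat, l.foldl (fun best r => max best (rowScoreB r)) (max b c)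
      = max b (l.foldl (fun best r => max best (rowScoreB r)) c) := by
  induction l with
  | nil => intro b c; simp
  | cons a l ih =>
    intro b c
    simp only [List.foldl_cons]
    rw [max_assoc, ih]

lemma foldl_max_spec (l : List (List (String × String))) :
    l.foldl (fun best r => max best (rowScoreB r)) 1
      = if ∃ r ∈ l, rowScoreB r = 3 then 3
        else if ∃ r ∈ l, rowScoreB r = 2 then 2 else 1 := by
  induction l with
  | nil => simp
  | cons a l ih =>
    simp only [List.foldl_cons]
    have h1 : max 1 (rowScoreB a) = max (rowScoreB a) 1 := max_comm _ _
    rw [h1, foldl_max_shift, ih]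
    rcases rowScoreB_cases a with h | h | h <;>
      by_cases e3 : ∃ r ∈ l, rowScoreB r = 3 <;>
      by_cases e2 : ∃ r ∈ l, rowScoreB r = 2 <;>
      simp [h, e3, e2]

theorem confidence_from_rows_spec_aux (rows : List (List (String × String))) :
    confidence_from_rows rows = confidence_from_rows_alt rows := by
  unfold confidence_from_rows confidence_from_rows_alt
  by_cases hnil : rows = []
  · simp [hnil]
  · simp only [hnil, if_false]
    rw [PySem.List.slice_to rows (by omega), foldl_max_spec]
    set l := List.take (Int.toNat 3) rows with hl
    simp only [List.any_map, List.any_eq_true, Function.comp_apply, beq_iff_eq, Bool.or_eq_true]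
    by_cases h3 : ∃ r ∈ l, PySem.Str.lower (PySem.Dict.getD (PySem.Dict.mk r) "document_type" "") = "guideline" ∨ PySem.Str.upper (PySem.Dict.getD (PySem.Dict.mk r) "evidence_level" "") = "I"
    · have hB : ∃ r ∈ l, rowScoreB r = 3 := by
        obtain ⟨r, hr, h⟩ := h3; exact ⟨r, hr, (rowScoreB_eq_three_iff r).2 h⟩
      have hA : (∃ r ∈ l, PySem.Str.lower (PySem.Dict.getD (PySem.Dict.mk r) "document_type" "") = "guideline") ∨ (∃ r ∈ l, PySem.Str.upper (PySem.Dict.getD (PySem.Dict.mk r) "evidence_level" "") = "I") := by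
        obtain ⟨r, hr, h⟩ := h3
        rcases h with h | h
        · exact Or.inl ⟨r, hr, h⟩
        · exact Or.inr ⟨r, hr, h⟩
      simp [hA, hB]
    · have hB3 : ¬ ∃ r ∈ l, rowScoreB r = 3 := by
        rintro ⟨r, hr, h⟩
        exact h3 ⟨r, hr, (rowScoreB_eq_three_iff r).1 h⟩
      have hA3 : ¬ ((∃ r ∈ l, PySem.Str.lower (PySem.Dict.getD (PySem.Dict.mk r) "document_type" "") = "guideline") ∨ (∃ r ∈ l, PySem.Str.upper (PySem.Dict.getD (PySem.Dict.mk r) "evidence_level" "") = "I")) := by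
        rintro (⟨r, hr, h⟩ | ⟨r, hr, h⟩)
        · exact h3 ⟨r, hr, Or.inl h⟩
        · exact h3 ⟨r, hr, Or.inr h⟩
      by_cases h2 : ∃ r ∈ l, PySem.Str.lower (PySem.Dict.getD (PySem.Dict.mk r) "document_type" "") = "review" ∨ PySem.Str.upper (PySem.Dict.getD (PySem.Dict.mk r) "evidence_level" "") = "II"
      · have hB2 : ∃ r ∈ l, rowScoreB r = 2 := by
          obtain ⟨r, hr, h⟩ := h2
          refine ⟨r, hr, (rowScoreB_eq_two_iff r).2 ⟨fun hc => h3 ⟨r, hr, hc⟩, h⟩⟩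
        have hA2 : (∃ r ∈ l, PySem.Str.lower (PySem.Dict.getD (PySem.Dict.mk r) "document_type" "") = "review") ∨ (∃ r ∈ l, PySem.Str.upper (PySem.Dict.getD (PySem.Dict.mk r) "evidence_level" "") = "II") := by
          obtain ⟨r, hr, h⟩ := h2
          rcases h with h | h
          · exact Or.inl ⟨r, hr, h⟩
          · exact Or.inr ⟨r, hr, h⟩
        simp [hA3, hA2, hB3, hB2]
      · have hB2 : ¬ ∃ r ∈ l, rowScoreB r = 2 := by
          rintro ⟨r, hr, h⟩
          exact h2 ⟨r, hr, ((rowScoreB_eq_two_iff r).1 h).2⟩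
        have hA2 : ¬ ((∃ r ∈ l, PySem.Str.lower (PySem.Dict.getD (PySem.Dict.mk r) "document_type" "") = "review") ∨ (∃ r ∈ l, PySem.Str.upper (PySem.Dict.getD (PySem.Dict.mk r) "evidence_level" "") = "II")) := by
          rintro (⟨r, hr, h⟩ | ⟨r, hr, h⟩)
          · exact h2 ⟨r, hr, Or.inl h⟩
          · exact h2 ⟨r, hr, Or.inr h⟩
        simp [hA3, hA2, hB3, hB2]

-- ===== VERDICT (by name: the statement is the Claim_ definition above) =====
theorem confidence_from_rows_spec : Claim_equal_confidence_from_rows := by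
  intro rows _
  exact confidence_from_rows_spec_aux rows
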